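-- pv_equiv track=rewrite | github.com/vikramsankhala/Headphones | Documents/Christian/CDD-main/app.py | is_connectivity_service
-- ===== SOURCE A (Python) =====
-- def is_connectivity_service(row):
--     """
--     Check if a row represents a connectivity service that should be excluded.
--     """
--     # Check for sap_connectivity field
--     if 'sap_connectivity' in row and row.get('sap_connectivity'):
--         return True
--
--     # Check service name for connectivity-related keywords
--     service = str(row.get('service', '')).lower()
--     connectivity_keywords = [
--         'vpn', 'direct connect', 'vpc peering', 'transit gateway',
--         'loadbalancer', 'load balancer', 'connectivity', 'egress',
--         'supplementary service', 'tgw attachment'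
--     ]
--     if any(keyword in service for keyword in connectivity_keywords):
--         return True
--
--     # Check system_name for connectivity-related keywords
--     system_name = str(row.get('system_name', '')).lower()
--     if any(keyword in system_name for keyword in connectivity_keywords):
--         return True
--
--     return False
-- ===== SOURCE B (Python) =====
-- _KW = [
--     'vpn', 'direct connect', 'vpc peering', 'transit gateway',
--     'loadbalancer', 'load balancer', 'connectivity', 'egress',
--     'supplementary service', 'tgw attachment'
-- ]
--
-- # Index the keywords by their first character once, so the scan over a field
-- # only tests keywords that can start at the current position.
-- _BY_FIRST = {}
-- for _k in _KW:
--     _BY_FIRST.setdefault(_k[0], []).append(_k)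
--
--
-- def _has_keyword(s):
--     # single left-to-right position scan; at each position only the keywords
--     # starting with that character are tried
--     for i in range(len(s)):
--         for k in _BY_FIRST.get(s[i], ()):
--             if s.startswith(k, i):
--                 return True
--     return False
--
--
-- def is_connectivity_service(row):
--     if 'sap_connectivity' in row and row.get('sap_connectivity'):
--         return True
--     return (_has_keyword(str(row.get('service', '')).lower())
--             or _has_keyword(str(row.get('system_name', '')).lower()))
-- ===== Notes on version B (the rewrite author's own statement) =====
-- stated objective: alternative
-- what changed: B replaces A's keyword-by-keyword substring (`in`) searches over each field with a first-character index of the keyword list built once and a single left-to-right position scan per lowered field that only tries the keywords starting with the character at that position.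
import Mathlib
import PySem

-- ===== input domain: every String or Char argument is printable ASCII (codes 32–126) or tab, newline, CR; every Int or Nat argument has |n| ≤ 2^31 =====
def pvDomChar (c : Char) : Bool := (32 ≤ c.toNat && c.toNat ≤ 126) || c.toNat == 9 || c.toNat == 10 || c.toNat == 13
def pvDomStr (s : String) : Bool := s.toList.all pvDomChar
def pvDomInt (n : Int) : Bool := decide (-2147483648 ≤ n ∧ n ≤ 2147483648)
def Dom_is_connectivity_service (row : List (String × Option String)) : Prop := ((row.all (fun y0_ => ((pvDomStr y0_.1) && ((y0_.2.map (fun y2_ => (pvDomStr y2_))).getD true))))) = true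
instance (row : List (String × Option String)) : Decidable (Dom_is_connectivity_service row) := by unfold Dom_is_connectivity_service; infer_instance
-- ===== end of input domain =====

-- B indexes the keywords by first character once and scans each field position by
-- position, testing only the keywords that can start there, instead of A's
-- keyword-by-keyword `in` searches per field (alternative algorithm; return value only).

-- ===== PORT A =====
-- Python truthiness of an Optional[str] value
def pyTruthy (v : Option String) : Bool :=
  match v with
  | none => false
  | some s => !(s.toList == ([] : List Char))

-- str(v) for v : Optional[str]
def pyStrOfOpt (v : Option String) : String :=
  match v with
  | none => "None"
  | some s => s

def connectivityKeywords : List String :=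
  ["vpn", "direct connect", "vpc peering", "transit gateway",
   "loadbalancer", "load balancer", "connectivity", "egress",
   "supplementary service", "tgw attachment"]

def is_connectivity_service (row : List (String × Option String)) : Bool :=
  let d := PySem.Dict.mk row
  if d.contains "sap_connectivity" && pyTruthy (d.getD "sap_connectivity" none) then
    true
  else
    let service := PySem.Str.lower (pyStrOfOpt (d.getD "service" (some "")))
    if connectivityKeywords.any (fun k => PySem.Str.isIn k service) then
      true
    else
      let system_name := PySem.Str.lower (pyStrOfOpt (d.getD "system_name" (some "")))
      if connectivityKeywords.any (fun k => PySem.Str.isIn k system_name) then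
        true
      else
        false

-- ===== PORT B =====
def KW : List String :=
  ["vpn", "direct connect", "vpc peering", "transit gateway",
   "loadbalancer", "load balancer", "connectivity", "egress",
   "supplementary service", "tgw attachment"]

-- module-level loop building _BY_FIRST via setdefault(k[0], []).append(k);
-- k[0] on these nonempty literal keywords is exactly headD ' ' (default never used)
def BY_FIRST : PySem.Dict Char (List String) :=
  KW.foldl (fun d k => d.modify (k.toList.headD ' ') [] (fun v => v ++ [k])) PySem.Dict.empty

-- _has_keyword's position loop `for i in range(len(s))`, as structural recursion over
-- the suffixes of s; s.startswith(k, i) is k.toList.isPrefixOf (the suffix at i)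
def hasKeywordFrom : List Char → Bool
  | [] => false
  | c :: rest =>
      (BY_FIRST.getD c []).any (fun k => k.toList.isPrefixOf (c :: rest)) || hasKeywordFrom rest

def has_keyword (s : String) : Bool := hasKeywordFrom s.toList

def is_connectivity_service_alt (row : List (String × Option String)) : Bool :=
  let d := PySem.Dict.mk row
  if d.contains "sap_connectivity" && pyTruthy (d.getD "sap_connectivity" none) then
    true
  else
    has_keyword (PySem.Str.lower (pyStrOfOpt (d.getD "service" (some "")))) ||
      has_keyword (PySem.Str.lower (pyStrOfOpt (d.getD "system_name" (some ""))))

-- ===== PRECONDITION & SPEC =====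
def Spec_is_connectivity_service (row : List (String × Option String)) (out : Bool) : Prop := out = is_connectivity_service_alt row
instance (row : List (String × Option String)) (out : Bool) : Decidable (Spec_is_connectivity_service row out) := by unfold Spec_is_connectivity_service; infer_instance

-- ===== CLAIM (what is proved, stated in full; the proofs are below) =====
def Claim_equal_is_connectivity_service : Prop := ∀ (row : List (String × Option String)), Dom_is_connectivity_service row → Spec_is_connectivity_service row (is_connectivity_service row)

-- ===== LEMMAS AND PROOFS =====

-- the built index, as a literal dict
theorem BY_FIRST_eq : BY_FIRST = PySem.Dict.mk
    [('v', ["vpn", "vpc peering"]), ('d', ["direct connect"]),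
     ('t', ["transit gateway", "tgw attachment"]), ('l', ["loadbalancer", "load balancer"]),
     ('c', ["connectivity"]), ('e', ["egress"]), ('s', ["supplementary service"])] := by decide

-- at a position whose character is c, testing only the keywords indexed under c is
-- the same as testing every keyword (the others fail on their first character)
theorem inner_eq (c : Char) (rest : List Char) :
    ((BY_FIRST.getD c []).any fun k => k.toList.isPrefixOf (c :: rest))
      = (KW.any fun k => k.toList.isPrefixOf (c :: rest)) := by
  rw [BY_FIRST_eq]
  simp only [PySem.Dict.getD, PySem.Dict.get?_mk_cons, KW]
  split_ifs with h1 h2 h3 h4 h5 h6 h7 <;>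
    first
      | (first | (replace h1 : _ = c := eq_of_beq h1; subst h1)
               | (replace h2 : _ = c := eq_of_beq h2; subst h2)
               | (replace h3 : _ = c := eq_of_beq h3; subst h3)
               | (replace h4 : _ = c := eq_of_beq h4; subst h4)
               | (replace h5 : _ = c := eq_of_beq h5; subst h5)
               | (replace h6 : _ = c := eq_of_beq h6; subst h6)
               | (replace h7 : _ = c := eq_of_beq h7; subst h7)) <;>
        simp [List.isPrefixOf]
      | (simp only [Bool.not_eq_true] at h1 h2 h3 h4 h5 h6 h7;
          simp [PySem.Dict.get?, List.isPrefixOf, h1, h2, h3, h4, h5, h6, h7])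

theorem any_congr' (l : List String) (f g : String → Bool) (h : ∀ k ∈ l, f k = g k) :
    l.any f = l.any g := by
  induction l with
  | nil => rfl
  | cons a t ih =>
    rw [List.any_cons, List.any_cons, h a (List.mem_cons_self),
      ih (fun k hk => h k (List.mem_cons_of_mem a hk))]

theorem any_or_split (l : List String) (f g : String → Bool) :
    (l.any fun k => f k || g k) = (l.any f || l.any g) := by
  induction l with
  | nil => rfl
  | cons a t ih =>
    rw [List.any_cons, List.any_cons, List.any_cons, ih]
    cases f a <;> cases g a <;> cases t.any f <;> cases t.any g <;> rfl

-- the position scan finds exactly the keywords occurring as an infix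
theorem hasKeywordFrom_eq (s : List Char) :
    hasKeywordFrom s = KW.any (fun k => decide (k.toList <:+: s)) := by
  induction s with
  | nil => decide
  | cons c rest ih =>
    rw [hasKeywordFrom, inner_eq, ih]
    have point : ∀ k ∈ KW, (decide (k.toList <:+: (c :: rest)) : Bool)
        = (k.toList.isPrefixOf (c :: rest) || decide (k.toList <:+: rest)) := by
      intro k _
      rw [Bool.eq_iff_iff]
      simp [List.infix_cons_iff, List.isPrefixOf_iff_prefix]
    rw [any_congr' _ _ _ point, any_or_split]

-- per field: B's scan equals A's keyword-by-keyword `in` test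
theorem has_keyword_eq (f : String) :
    has_keyword f = connectivityKeywords.any (fun k => PySem.Str.isIn k f) := by
  rw [has_keyword, hasKeywordFrom_eq]
  refine any_congr' _ _ _ (fun k _ => ?_)
  rw [Bool.eq_iff_iff]
  simp [PySem.Chars.isIn_iff_infix]

theorem ite_shape (g x y z : Bool) (h : (x || y) = z) :
    (if g then true else if x then true else if y then true else false) =
      (if g then true else z) := by
  subst h
  cases g <;> cases x <;> cases y <;> rfl

-- ===== VERDICT (by name: the statement is the Claim_ definition above) =====
theorem is_connectivity_service_spec : Claim_equal_is_connectivity_service := by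
  intro row _
  show is_connectivity_service row = is_connectivity_service_alt row
  simp only [is_connectivity_service, is_connectivity_service_alt]
  exact ite_shape _ _ _ _ (by rw [has_keyword_eq, has_keyword_eq])
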